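-- pv_equiv track=rewrite | github.com/jspricke/radio | tuner.py | caps
-- ===== SOURCE A (Python) =====
-- def caps(string):
--     list = string.split(' ')
--     newlist = []
--     for word in list:
--         if word.isupper():
--             newlist.append(word.capitalize())
--         else:
--             newlist.append(word)
--     return ' '.join(newlist)
-- ===== SOURCE B (Python) =====
-- def caps(string):
--     out = []
--     i = 0
--     n = len(string)
--     while i < n:
--         if string[i] == ' ':
--             out.append(' ')
--             i += 1
--         else:
--             j = i
--             while j < n and string[j] != ' ':
--                 j += 1
--             tok = string[i:j]
--             out.append(tok.capitalize() if tok.isupper() else tok)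
--             i = j
--     return ''.join(out)
-- ===== Notes on version B (the rewrite author's own statement) =====
-- stated objective: alternative
-- what changed: Replaces the split/per-word-list/join pipeline of A with a single in-place scan that copies spaces through and rewrites each maximal non-space run as it is found.
import Mathlib
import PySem

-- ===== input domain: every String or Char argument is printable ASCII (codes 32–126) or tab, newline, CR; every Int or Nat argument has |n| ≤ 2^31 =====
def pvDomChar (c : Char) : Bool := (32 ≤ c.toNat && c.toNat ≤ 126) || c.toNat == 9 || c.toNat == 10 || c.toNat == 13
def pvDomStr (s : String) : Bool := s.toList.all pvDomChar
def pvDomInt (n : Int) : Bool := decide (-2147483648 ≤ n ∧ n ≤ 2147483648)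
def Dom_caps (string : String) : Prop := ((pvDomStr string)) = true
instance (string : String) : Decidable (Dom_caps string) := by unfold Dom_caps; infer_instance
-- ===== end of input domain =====

-- B replaces the split/map/join pipeline with one left-to-right scan over the characters (alternative decomposition, same cost).

-- ===== PORT A =====
-- str.isupper(): at least one cased character and no lowercase one (exact on the ASCII domain)
def pyStrIsupper (cs : List Char) : Bool :=
  cs.any PySem.Chars.isupper && !cs.any PySem.Chars.islower

-- str.capitalize(): first character uppercased, the rest lowercased (exact on the ASCII domain)
def pyCapitalize (cs : List Char) : List Char :=
  match cs with
  | [] => []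
  | c :: t => PySem.Chars.upperChar c :: PySem.Chars.lower t

def caps (string : String) : String :=
  let lst := PySem.Chars.splitOn string.toList [' ']
  let newlist := lst.foldl
    (fun acc word => acc ++ [if pyStrIsupper word then pyCapitalize word else word]) []
  String.ofList (PySem.Chars.join [' '] newlist)

-- ===== PORT B =====
-- the scan of Source B: copy a space through, else take the maximal non-space run, rewrite it, continue after it
def capsScan (cs : List Char) : List Char :=
  match cs with
  | [] => []
  | c :: t =>
    if c = ' ' then ' ' :: capsScan t
    else
      let tok := (c :: t).takeWhile (· ≠ ' ')
      (if pyStrIsupper tok then pyCapitalize tok else tok) ++ capsScan ((c :: t).dropWhile (· ≠ ' '))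
termination_by cs.length
decreasing_by
  · exact Nat.lt_succ_of_le (Nat.le_refl _)
  · simp only [List.dropWhile, List.length_cons]
    split
    · exact Nat.lt_succ_of_le (List.length_dropWhile_le _ _)
    · simp_all

def caps_alt (string : String) : String := String.ofList (capsScan string.toList)

-- ===== PRECONDITION & SPEC =====
def Spec_caps (string : String) (out : String) : Prop := out = caps_alt string
instance (string : String) (out : String) : Decidable (Spec_caps string out) := by unfold Spec_caps; infer_instance

-- ===== CLAIM (what is proved, stated in full; the proofs are below) =====
def Claim_equal_caps : Prop := ∀ (string : String), Dom_caps string → Spec_caps string (caps string)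

-- ===== LEMMAS AND PROOFS =====

-- structural characterisation of split(' ')
def splitSp : List Char → List (List Char)
  | [] => [[]]
  | c :: t => if c = ' ' then [] :: splitSp t else (splitSp t).modifyHead (c :: ·)

theorem splitSp_ne_nil (cs : List Char) : splitSp cs ≠ [] := by
  induction cs with
  | nil => simp [splitSp]
  | cons c t ih =>
    simp only [splitSp]; split
    · simp
    · cases h : splitSp t with
      | nil => exact absurd h ih
      | cons a l => simp [List.modifyHead]

theorem splitOn_go_eq (fuel : Nat) : ∀ (l cur : List Char) (accl : List (List Char)),
    l.length ≤ fuel →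
    PySem.Chars.splitOn.go [' '] fuel l cur accl =
      accl.reverse ++ (splitSp l).modifyHead (cur.reverse ++ ·) := by
  induction fuel with
  | zero =>
    intro l cur accl h
    have : l = [] := List.length_eq_zero_iff.mp (Nat.le_zero.mp h)
    subst this
    simp [PySem.Chars.splitOn.go, splitSp]
  | succ n ih =>
    intro l cur accl h
    cases l with
    | nil => simp [PySem.Chars.splitOn.go, splitSp]
    | cons c t =>
      simp only [PySem.Chars.splitOn.go]
      by_cases hc : c = ' '
      · subst hc
        rw [if_pos (by simp [List.isPrefixOf])]
        simp only [List.length_singleton, List.drop_one, List.tail_cons]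
        rw [ih t [] _ (by simpa using h)]
        simp [splitSp]
        cases hs : splitSp t with
        | nil => simp [List.modifyHead]
        | cons a l2 => simp [List.modifyHead]
      · rw [if_neg (by simp [List.isPrefixOf]; exact fun e => hc e.symm)]
        rw [ih t (c :: cur) _ (by simpa using h)]
        simp only [splitSp, if_neg hc]
        cases hs : splitSp t with
        | nil => simp [List.modifyHead]
        | cons a l2 => simp [List.modifyHead]

theorem splitOn_eq_splitSp (cs : List Char) :
    PySem.Chars.splitOn cs [' '] = splitSp cs := by
  simp only [PySem.Chars.splitOn]
  rw [splitOn_go_eq _ _ _ _ (Nat.le_succ _)]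
  cases hs : splitSp cs with
  | nil => simp [List.modifyHead]
  | cons a l => simp [List.modifyHead]

theorem splitSp_tok (cs : List Char) :
    splitSp cs = (cs.takeWhile (· ≠ ' ')) ::
      (match cs.dropWhile (· ≠ ' ') with
       | [] => ([] : List (List Char))
       | _ :: r => splitSp r) := by
  induction cs with
  | nil => simp [splitSp]
  | cons c t ih =>
    by_cases hc : c = ' '
    · subst hc; simp [splitSp, List.takeWhile, List.dropWhile]
    · simp only [splitSp, if_neg hc, ih]
      simp [List.takeWhile, List.dropWhile, hc, List.modifyHead]

-- the per-word transformation both programs apply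
def capF (w : List Char) : List Char := if pyStrIsupper w then pyCapitalize w else w

theorem join_map_splitSp_eq_scan : ∀ (n : Nat) (cs : List Char), cs.length ≤ n →
    PySem.Chars.join [' '] ((splitSp cs).map capF) = capsScan cs := by
  intro n
  induction n with
  | zero =>
    intro cs h
    have : cs = [] := List.length_eq_zero_iff.mp (Nat.le_zero.mp h)
    subst this
    simp [splitSp, capsScan, capF, pyStrIsupper]
  | succ n ih =>
    intro cs h
    cases cs with
    | nil => simp [splitSp, capsScan, capF, pyStrIsupper]
    | cons c t =>
      by_cases hc : c = ' '
      · subst hc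
        have e1 : splitSp (' ' :: t) = [] :: splitSp t := by rw [splitSp]; simp
        have e2 : capsScan (' ' :: t) = ' ' :: capsScan t := by rw [capsScan]; simp
        rw [e1, e2, List.map_cons]
        have hne := splitSp_ne_nil t
        cases hs : splitSp t with
        | nil => exact absurd hs hne
        | cons a l =>
          rw [List.map_cons, PySem.Chars.join_cons_cons, ← List.map_cons, ← hs,
              ih t (by simpa using h)]
          simp [capF, pyStrIsupper]
      · rw [splitSp_tok (c :: t)]
        have hdw : (c :: t).dropWhile (· ≠ ' ') = t.dropWhile (· ≠ ' ') := by
          simp [List.dropWhile, hc]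
        rw [hdw]
        conv_rhs => rw [capsScan]
        rw [if_neg hc, hdw]
        cases hr : t.dropWhile (· ≠ ' ') with
        | nil =>
          simp only [List.map_cons, List.map_nil, PySem.Chars.join_singleton]
          rw [capsScan]
          simp [capF]
        | cons d r =>
          have hd : d = ' ' := by
            have hnn : t.dropWhile (fun x => decide (x ≠ ' ')) ≠ [] := by
              rw [hr]; exact List.cons_ne_nil _ _
            have := List.head_dropWhile_not (p := fun x => decide (x ≠ ' ')) (l := t) hnn
            simp only [hr, List.head_cons] at this
            simpa using this
          subst hd
          have hne := splitSp_ne_nil r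
          have e3 : (match (' ' :: r : List Char) with
                     | [] => ([] : List (List Char))
                     | _ :: r => splitSp r) = splitSp r := rfl
          rw [e3]
          cases hs : splitSp r with
          | nil => exact absurd hs hne
          | cons a l =>
            rw [List.map_cons, List.map_cons, PySem.Chars.join_cons_cons,
                ← List.map_cons, ← hs]
            have hr2 : r.length ≤ n := by
              have h1 := List.length_dropWhile_le (fun x => decide (x ≠ ' ')) t
              rw [hr] at h1
              simp only [List.length_cons] at h1 h
              omega
            rw [ih r hr2, capsScan, if_pos rfl]
            simp [capF]

-- ===== VERDICT (by name: the statement is the Claim_ definition above) =====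
theorem caps_spec : Claim_equal_caps := by
  intro string _
  show caps string = caps_alt string
  simp only [caps, caps_alt,
    PySem.List.foldl_append_singleton_eq_map
      (fun word => if pyStrIsupper word then pyCapitalize word else word),
    List.nil_append, splitOn_eq_splitSp]
  rw [show (fun word => if pyStrIsupper word = true then pyCapitalize word else word) = capF from rfl,
      join_map_splitSp_eq_scan string.toList.length _ (Nat.le_refl _)]
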